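-- pv_equiv track=rewrite | github.com/chiralcentre/Kattis | hidden.py | solve
-- ===== SOURCE A (Python) =====
-- def solve(password,string):
--     pw_curr,str_curr = 0,0
--     while pw_curr < len(password) and str_curr <= len(string):
--         if str_curr == len(string): #end of string is reached
--             return "FAIL"
--         elif string[str_curr] == password[pw_curr]:
--             pw_curr += 1
--             if pw_curr == len(password):
--                 return "PASS"
--         else:
--             for i in range(pw_curr + 1, len(password)):
--                 if password[i] == string[str_curr]:
--                     return "FAIL"
--         str_curr += 1
-- ===== SOURCE B (Python) =====
-- def solve(password, string):
--     remaining = {}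
--     for ch in password:
--         remaining[ch] = remaining.get(ch, 0) + 1
--     it = iter(string)
--     for expected in password:
--         hit = None
--         for ch in it:
--             if remaining.get(ch, 0) > 0:
--                 hit = ch
--                 break
--         if hit is None or hit != expected:
--             return "FAIL"
--         remaining[hit] = remaining[hit] - 1
--     return "PASS"
-- ===== Notes on version B (the rewrite author's own statement) =====
-- stated objective: alternative
-- what changed: B loops over the password, not the string: it builds a multiset (dict of counts) of password characters once, then for each expected password character consumes string characters from a shared iterator until one with a positive remaining count appears and requires it to be the expected one, replacing A's string-pointer scan with a per-mismatch rescan of the password suffix.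
-- outside the precondition, e.g. on solve('', 'abc'): A returns None, B returns 'PASS'
import Mathlib
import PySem

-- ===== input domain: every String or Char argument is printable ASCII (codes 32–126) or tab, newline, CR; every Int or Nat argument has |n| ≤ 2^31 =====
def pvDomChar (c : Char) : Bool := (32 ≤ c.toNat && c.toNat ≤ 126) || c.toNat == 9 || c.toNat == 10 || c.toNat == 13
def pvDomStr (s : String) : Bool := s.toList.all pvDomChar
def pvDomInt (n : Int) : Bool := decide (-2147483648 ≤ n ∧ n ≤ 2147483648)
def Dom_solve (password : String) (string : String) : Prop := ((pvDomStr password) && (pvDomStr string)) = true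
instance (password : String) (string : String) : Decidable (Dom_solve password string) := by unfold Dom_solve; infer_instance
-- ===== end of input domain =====

-- B restructures A: an outer loop over the password consumes, per expected character, the first string
-- character still present in a multiset of the remaining password characters, demanding it be the expected one.

-- ===== PORT A =====
-- inner 'for i in range(pw_curr + 1, len(password)): if password[i] == string[str_curr]: return "FAIL"'
def innerA : List Char → Char → Bool
  | [], _ => false
  | x :: xs, c => if x = c then true else innerA xs c

-- the while loop: rest = string[str_curr:], k = pw_curr ('str_curr <= len(string)' always holds,
-- 'str_curr == len(string)' is rest = [])
def loopA (pw : List Char) : List Char → Nat → Option String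
  | rest, k =>
    if k < pw.length then
      match rest with
      | [] => some "FAIL"
      | c :: rest' =>
        if c = pw.getD k ' ' then
          if k + 1 = pw.length then some "PASS" else loopA pw rest' (k + 1)
        else if innerA (pw.drop (k + 1)) c then some "FAIL"
        else loopA pw rest' k
    else none

def solve (password : String) (string : String) : Option String :=
  loopA password.toList string.toList 0

-- ===== PORT B =====
-- 'remaining = {}; for ch in password: remaining[ch] = remaining.get(ch, 0) + 1'
def buildRem (pw : List Char) : PySem.Dict Char Int :=
  pw.foldl (fun d ch => d.insert ch (d.getD ch 0 + 1)) PySem.Dict.empty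

-- 'hit = None; for ch in it: if remaining.get(ch, 0) > 0: hit = ch; break' — the hit and the iterator's rest
def findRel (rem : PySem.Dict Char Int) : List Char → Option (Char × List Char)
  | [] => none
  | ch :: s => if rem.getD ch 0 > 0 then some (ch, s) else findRel rem s

-- 'for expected in password: …' — structural recursion on the password; the string iterator is threaded through
def loopB : List Char → PySem.Dict Char Int → List Char → Option String
  | [], _, _ => some "PASS"
  | e :: ps, rem, s =>
    match findRel rem s with
    | none => some "FAIL"
    | some (hit, s') =>
      if hit ≠ e then some "FAIL"
      -- 'remaining[hit] = remaining[hit] - 1': exact, since the hit's count is positive the key is present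
      else loopB ps (rem.insert hit (rem.getD hit 0 - 1)) s'

def solve_alt (password : String) (string : String) : Option String :=
  loopB password.toList (buildRem password.toList) string.toList

-- ===== PRECONDITION & SPEC =====
-- Pre_ excludes the empty password, on which A falls off its loop and returns None (no string of the
-- declared pass/fail type); B naturally returns "PASS" there (an empty password is trivially matched).
def Pre_solve (password : String) (string : String) : Prop := password ≠ ""
instance (password : String) (string : String) : Decidable (Pre_solve password string) := by
  unfold Pre_solve; infer_instance

def pvWitness_solve : String × String := ("a", "")

def Spec_solve (password : String) (string : String) (out : Option String) : Prop := out = solve_alt password string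
instance (password : String) (string : String) (out : Option String) : Decidable (Spec_solve password string out) := by unfold Spec_solve; infer_instance

-- ===== CLAIM (what is proved, stated in full; the proofs are below) =====
def Claim_equal_solve : Prop := ∀ (password : String) (string : String), Dom_solve password string → Pre_solve password string → Spec_solve password string (solve password string)

-- ===== LEMMAS AND PROOFS =====

-- innerA is membership in the scanned suffix
theorem innerA_iff (xs : List Char) (c : Char) : innerA xs c = true ↔ c ∈ xs := by
  induction xs with
  | nil => simp [innerA]
  | cons x xs ih =>
      by_cases hx : x = c
      · simp [innerA, hx]
      · simp [innerA, hx, ih]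
        exact fun h => (hx h.symm).elim

-- the multiset built by B's first loop counts the password's characters
theorem buildRem_getD (pw : List Char) (ch : Char) :
    (buildRem pw).getD ch 0 = (pw.count ch : Int) := by
  simp [buildRem, PySem.Dict.getD_foldl_insert_add_one, PySem.Dict.getD_empty]

-- the two loops agree while k < |pw|, provided rem counts the remaining password suffix pw.drop k
theorem loop_eq (pw : List Char) (rest : List Char) (k : Nat) (rem : PySem.Dict Char Int)
    (hk : k < pw.length)
    (hrem : ∀ ch, rem.getD ch 0 = ((pw.drop k).count ch : Int)) :
    loopA pw rest k = loopB (pw.drop k) rem rest := by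
  induction rest generalizing k rem with
  | nil =>
      rw [loopA, if_pos hk]
      obtain ⟨p0, ptl, hdrop⟩ : ∃ p0 ptl, pw.drop k = p0 :: ptl := by
        cases hd : pw.drop k with
        | nil => exact absurd (by simpa using congrArg List.length hd) (by omega)
        | cons a l => exact ⟨a, l, rfl⟩
      rw [hdrop, loopB]
      simp [findRel]
  | cons c rest' ih =>
      rw [loopA, if_pos hk]
      obtain ⟨p0, ptl, hdrop⟩ : ∃ p0 ptl, pw.drop k = p0 :: ptl := by
        cases hd : pw.drop k with
        | nil => exact absurd (by simpa using congrArg List.length hd) (by omega)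
        | cons a l => exact ⟨a, l, rfl⟩
      have hp0 : pw.getD k ' ' = p0 := by
        have := congrArg (fun l => l.getD 0 ' ') hdrop
        simpa [List.getD, List.getElem?_drop] using this
      have hptl : pw.drop (k + 1) = ptl := by
        have := congrArg List.tail hdrop
        simpa [List.tail_drop] using this
      have hpos_iff : ∀ x, (rem.getD x 0 > 0 ↔ x ∈ p0 :: ptl) := by
        intro x
        rw [hrem x, hdrop]
        constructor
        · intro hgt
          exact List.count_pos_iff.mp (by exact_mod_cast hgt)
        · intro hm
          exact_mod_cast Int.natCast_pos.mpr (List.count_pos_iff.mpr hm)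
      rw [hp0, hptl, hdrop]
      by_cases hmatch : c = p0
      · -- c is the expected next character: A advances; B's hit is c itself and it matches
        subst hmatch
        rw [if_pos rfl, loopB]
        have hcpos : rem.getD c 0 > 0 := (hpos_iff c).mpr (by simp)
        simp only [findRel, if_pos hcpos, ne_eq, not_true_eq_false, if_false]
        by_cases hfull : k + 1 = pw.length
        · rw [if_pos hfull]
          have hlen := congrArg List.length hdrop
          simp at hlen
          have hnil : ptl = [] := List.length_eq_zero_iff.mp (by omega)
          rw [hnil, loopB]
        · rw [if_neg hfull]
          have hrem' : ∀ ch, (rem.insert c (rem.getD c 0 - 1)).getD ch 0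
              = ((pw.drop (k + 1)).count ch : Int) := by
            intro ch
            rw [PySem.Dict.getD_insert, hptl]
            by_cases hch : ch = c
            · subst hch
              rw [if_pos rfl, hrem ch, hdrop]
              simp [List.count_cons_self]
            · rw [if_neg hch, hrem ch, hdrop]
              simp [Ne.symm hch]
          rw [ih (k + 1) _ (by omega) hrem', hptl]
      · rw [if_neg hmatch]
        by_cases hin : innerA ptl c = true
        · -- c occurs later in the password: both FAIL (B's hit is c, and it differs from the expected p0)
          rw [if_pos hin, loopB]
          have hcpos : rem.getD c 0 > 0 := (hpos_iff c).mpr (by simp [(innerA_iff _ _).mp hin])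
          simp [findRel, hcpos, hmatch]
        · -- c is in no remaining password position: both skip it
          rw [if_neg hin]
          have hczero : ¬ rem.getD c 0 > 0 := by
            rw [hpos_iff c]
            intro hm
            rcases List.mem_cons.mp hm with h0 | h1
            · exact hmatch h0
            · exact hin ((innerA_iff _ _).mpr h1)
          have hskip : loopB (p0 :: ptl) rem (c :: rest') = loopB (p0 :: ptl) rem rest' := by
            rw [loopB, loopB, findRel, if_neg hczero]
          rw [hskip, ← hdrop, ih k rem hk hrem]

-- ===== VERDICT (by name: the statement is the Claim_ definition above) =====
theorem solve_spec : Claim_equal_solve := by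
  intro password string _ hpre
  unfold Spec_solve solve solve_alt
  have hne : password.toList ≠ [] := by
    simpa [ne_eq, String.toList_eq_nil_iff] using hpre
  have hrem0 : ∀ ch, (buildRem password.toList).getD ch 0
      = ((password.toList.drop 0).count ch : Int) := by
    intro ch
    rw [List.drop_zero]
    exact buildRem_getD password.toList ch
  rw [loop_eq password.toList string.toList 0 (buildRem password.toList)
      (List.length_pos_of_ne_nil hne) hrem0, List.drop_zero]
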